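-- pv_equiv track=rewrite | github.com/AndrewS-hash/pyFiddle | pyFiddle_Intermediate.py | count_vowel_neighbors
-- ===== SOURCE A (Python) =====
-- def count_vowel_neighbors(s: str) -> int:
--     """
--     Count characters in the string that have vowels as their neighbors.
--
--     Args:
--         s (str): The input string.
--
--     Returns:
--         int: The count of characters with vowels as neighbors.
--     """
--     # Define the set of vowels (case insensitive)
--     vowels = {'a', 'e', 'i', 'o', 'u'}
--
--     # Initialize count to 0
--     count = 0
--     #Edge case of array must have 2 letters
--     if len(s) < 2:
--         return 0
--     #check first
--
--     if s[0] not in vowels and s[1] in vowels: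
--         count += 1
--     #check last
--     if s[-1] not in vowels and s[-2] in vowels:
--         count += 1
--
--     # Iterate through the string to check neighbors
--     for i in range(1, len(s) - 1):
--         if s[i] not in vowels and (s[i-1] in vowels or s[i+1] in vowels):
--             count += 1
--
--     return count
-- ===== SOURCE B (Python) =====
-- def count_vowel_neighbors(s: str) -> int:
--     """Count non-vowel characters that have a vowel neighbor, by marking
--     each vowel's non-vowel neighbors in a set and returning the set size."""
--     vowels = {'a', 'e', 'i', 'o', 'u'}
--     marked = set()
--     n = len(s)
--     for i in range(n):
--         if s[i] in vowels:
--             if i > 0 and s[i-1] not in vowels: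
--                 marked.add(i - 1)
--             if i < n - 1 and s[i+1] not in vowels:
--                 marked.add(i + 1)
--     return len(marked)
-- ===== Notes on version B (the rewrite author's own statement) =====
-- stated objective: alternative
-- what changed: Instead of A's three-part scan (first char, last char, middle loop) testing each position's neighbors, B iterates over vowel positions and marks each vowel's non-vowel neighbors in a set, returning the set's size.
import Mathlib
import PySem

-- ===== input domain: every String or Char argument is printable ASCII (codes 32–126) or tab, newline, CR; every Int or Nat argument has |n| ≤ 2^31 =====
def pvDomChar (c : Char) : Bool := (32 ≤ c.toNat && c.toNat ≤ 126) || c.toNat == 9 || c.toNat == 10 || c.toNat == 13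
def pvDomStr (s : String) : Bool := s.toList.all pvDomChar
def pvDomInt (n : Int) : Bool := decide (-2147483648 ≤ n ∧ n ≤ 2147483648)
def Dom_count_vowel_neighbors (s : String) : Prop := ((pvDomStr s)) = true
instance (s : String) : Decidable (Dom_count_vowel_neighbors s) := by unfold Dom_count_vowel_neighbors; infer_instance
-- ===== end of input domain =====

-- B replaces A's three-part scan (first char, last char, middle loop) by marking each
-- vowel's non-vowel neighbors in a set and returning the set's size (alternative
-- decomposition, same cost).

-- ===== PORT A =====
-- the literal set {'a','e','i','o','u'} both Pythons define
def pvVowels : PySem.Set Char := PySem.Set.ofList ['a', 'e', 'i', 'o', 'u']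
def count_vowel_neighbors (s : String) : Int :=
  let cs := s.toList
  if PySem.Str.len s < 2 then 0
  else
    let count : Int := 0
    let count :=
      if !(pvVowels.contains (PySem.List.pyGetD cs 0 ' ')) &&
         pvVowels.contains (PySem.List.pyGetD cs 1 ' ') then count + 1 else count
    let count :=
      if !(pvVowels.contains (PySem.List.pyGetD cs (-1) ' ')) &&
         pvVowels.contains (PySem.List.pyGetD cs (-2) ' ') then count + 1 else count
    (PySem.List.pyRange 1 (PySem.Str.len s - 1) 1).foldl
      (fun count i =>
        if !(pvVowels.contains (PySem.List.pyGetD cs i ' ')) &&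
           (pvVowels.contains (PySem.List.pyGetD cs (i - 1) ' ') ||
            pvVowels.contains (PySem.List.pyGetD cs (i + 1) ' ')) then count + 1
        else count)
      count
-- ===== PORT B =====
def count_vowel_neighbors_alt (s : String) : Int :=
  let cs := s.toList
  let n := PySem.Str.len s
  let marked : PySem.Set Int :=
    (PySem.List.pyRange 0 n 1).foldl
      (fun m i =>
        if pvVowels.contains (PySem.List.pyGetD cs i ' ') then
          let m :=
            if decide (0 < i) && !(pvVowels.contains (PySem.List.pyGetD cs (i - 1) ' ')) then
              m.add (i - 1)
            else m
          if decide (i < n - 1) && !(pvVowels.contains (PySem.List.pyGetD cs (i + 1) ' ')) then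
            m.add (i + 1)
          else m
        else m)
      PySem.Set.empty
  PySem.Set.len marked


-- ===== PRECONDITION & SPEC =====
def Spec_count_vowel_neighbors (s : String) (out : Int) : Prop := out = count_vowel_neighbors_alt s
instance (s : String) (out : Int) : Decidable (Spec_count_vowel_neighbors s out) := by unfold Spec_count_vowel_neighbors; infer_instance

-- ===== CLAIM (what is proved, stated in full; the proofs are below) =====
def Claim_equal_count_vowel_neighbors : Prop := ∀ (s : String), Dom_count_vowel_neighbors s → Spec_count_vowel_neighbors s (count_vowel_neighbors s)

-- ===== LEMMAS AND PROOFS =====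

def pvV (cs : List Char) (i : Int) : Bool := pvVowels.contains (PySem.List.pyGetD cs i ' ')
def pvPred (cs : List Char) (i : Int) : Bool :=
  !pvV cs i &&
    ((decide (0 < i) && pvV cs (i - 1)) ||
     (decide (i < (cs.length : Int) - 1) && pvV cs (i + 1)))

theorem pvGetD_neg_one {cs : List Char} (d : Char) (h : 1 ≤ cs.length) :
    PySem.List.pyGetD cs (-1) d = PySem.List.pyGetD cs ((cs.length : Int) - 1) d := by
  simp [PySem.List.pyGetD, PySem.List.pyGet?, PySem.List.pyIdx?, h]
theorem pvGetD_neg_two {cs : List Char} (d : Char) (h : 2 ≤ cs.length) :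
    PySem.List.pyGetD cs (-2) d = PySem.List.pyGetD cs ((cs.length : Int) - 2) d := by
  have h2 : ((cs.length : Int) - 2).toNat = cs.length - 2 := by omega
  simp [PySem.List.pyGetD, PySem.List.pyGet?, PySem.List.pyIdx?, h, h2]


theorem pvA_eq_countP (s : String) :
    count_vowel_neighbors s =
      ((PySem.List.pyRange 0 (s.toList.length : Int) 1).countP (pvPred s.toList) : Int) := by
  have hA : count_vowel_neighbors s =
      (if ((s.toList.length : Int)) < 2 then (0:Int) else
        (PySem.List.pyRange 1 ((s.toList.length : Int) - 1) 1).foldl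
          (fun count i =>
            if !(pvVowels.contains (PySem.List.pyGetD s.toList i ' ')) &&
               (pvVowels.contains (PySem.List.pyGetD s.toList (i - 1) ' ') ||
                pvVowels.contains (PySem.List.pyGetD s.toList (i + 1) ' ')) then count + 1
            else count)
          (if !(pvVowels.contains (PySem.List.pyGetD s.toList (-1) ' ')) &&
              pvVowels.contains (PySem.List.pyGetD s.toList (-2) ' ') then
             (if !(pvVowels.contains (PySem.List.pyGetD s.toList 0 ' ')) &&
                 pvVowels.contains (PySem.List.pyGetD s.toList 1 ' ') then (0:Int) + 1 else 0) + 1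
           else
             (if !(pvVowels.contains (PySem.List.pyGetD s.toList 0 ' ')) &&
                 pvVowels.contains (PySem.List.pyGetD s.toList 1 ' ') then (0:Int) + 1 else 0))) := by
    rfl
  rw [hA]
  generalize s.toList = cs
  by_cases h2 : (cs.length : Int) < 2
  · rw [if_pos h2]
    rcases cs with _ | ⟨a, _ | ⟨b, t⟩⟩
    · simp [PySem.List.pyRange_one_eq_nil]
    · have e : PySem.List.pyRange (0:Int) 1 = [0] := rfl
      simp [e, pvPred]
    · exfalso; simp at h2; omega
  · rw [if_neg h2]
    have hn : (2:Int) ≤ (cs.length : Int) := by omega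
    -- rewrite the negative indices
    rw [pvGetD_neg_one ' ' (by omega), pvGetD_neg_two ' ' (by omega)]
    -- middle loop: body = counting pvPred
    rw [PySem.List.foldl_congr_mem (PySem.List.pyRange 1 ((cs.length : Int) - 1) 1) _
          (fun count i => if pvPred cs i then count + 1 else count) _ ?_]
    · rw [PySem.List.foldl_count_if]
      -- split the full range
      rw [PySem.List.pyRange_one_append 0 1 (cs.length : Int) (by omega) (by omega),
          PySem.List.pyRange_one_append 1 ((cs.length : Int) - 1) (cs.length : Int) (by omega) (by omega)]
      have e0 : PySem.List.pyRange (0:Int) 1 = [0] := rfl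
      have e1 := PySem.List.pyRange_one_singleton ((cs.length : Int) - 1)
      rw [show ((cs.length : Int) - 1) + 1 = (cs.length : Int) by ring] at e1
      rw [e0, e1]
      have p0 : pvPred cs 0 =
          (!(pvVowels.contains (PySem.List.pyGetD cs 0 ' ')) &&
            pvVowels.contains (PySem.List.pyGetD cs 1 ' ')) := by
        simp [pvPred, pvV, show 1 < cs.length by omega]
      have pl : pvPred cs ((cs.length : Int) - 1) =
          (!(pvVowels.contains (PySem.List.pyGetD cs ((cs.length : Int) - 1) ' ')) &&
            pvVowels.contains (PySem.List.pyGetD cs ((cs.length : Int) - 2) ' ')) := by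
        simp [pvPred, pvV, show 1 < cs.length by omega,
              show ((cs.length : Int) - 1 - 1) = (cs.length : Int) - 2 by ring]
      simp only [List.countP_append, List.countP_cons, List.countP_nil, p0, pl]
      split_ifs <;> push_cast <;> omega
    · intro acc i hi
      rcases PySem.List.mem_pyRange_one.mp hi with ⟨hi1, hi2⟩
      simp [pvPred, pvV, show (0:Int) < i by omega, hi2]

def pvStep (cs : List Char) (n : Int) (m : PySem.Set Int) (i : Int) : PySem.Set Int :=
  if pvVowels.contains (PySem.List.pyGetD cs i ' ') then
    let m :=
      if decide (0 < i) && !(pvVowels.contains (PySem.List.pyGetD cs (i - 1) ' ')) then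
        m.add (i - 1)
      else m
    if decide (i < n - 1) && !(pvVowels.contains (PySem.List.pyGetD cs (i + 1) ' ')) then
      m.add (i + 1)
    else m
  else m

def pvAddedBy (cs : List Char) (n : Int) (i x : Int) : Prop :=
  pvV cs i = true ∧
    ((x = i - 1 ∧ 0 < i ∧ ¬ pvV cs (i - 1) = true) ∨
     (x = i + 1 ∧ i < n - 1 ∧ ¬ pvV cs (i + 1) = true))

theorem pv_mem_step (cs : List Char) (n : Int) (m : PySem.Set Int) (i x : Int) :
    x ∈ pvStep cs n m i ↔ x ∈ m ∨ pvAddedBy cs n i x := by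
  unfold pvStep pvAddedBy pvV
  split_ifs with hv hl hr hr <;>
    simp_all [PySem.Set.mem_add] <;> tauto

theorem pv_nodup_step (cs : List Char) (n : Int) (m : PySem.Set Int) (i : Int)
    (hm : m.Nodup) : (pvStep cs n m i).Nodup := by
  unfold pvStep
  split_ifs <;> solve
    | exact hm
    | exact PySem.Set.nodup_add _ _ hm
    | exact PySem.Set.nodup_add _ _ (PySem.Set.nodup_add _ _ hm)

theorem pv_mem_fold (cs : List Char) (n : Int) (l : List Int) (m : PySem.Set Int) (x : Int) :
    x ∈ l.foldl (pvStep cs n) m ↔ x ∈ m ∨ ∃ i ∈ l, pvAddedBy cs n i x := by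
  induction l generalizing m with
  | nil => simp
  | cons a t ih =>
      simp only [List.foldl_cons, ih, pv_mem_step, List.mem_cons]
      constructor
      · rintro ((h | h) | ⟨i, hi, h⟩)
        · exact Or.inl h
        · exact Or.inr ⟨a, Or.inl rfl, h⟩
        · exact Or.inr ⟨i, Or.inr hi, h⟩
      · rintro (h | ⟨i, (rfl | hi), h⟩)
        · exact Or.inl (Or.inl h)
        · exact Or.inl (Or.inr h)
        · exact Or.inr ⟨i, hi, h⟩

theorem pv_nodup_fold (cs : List Char) (n : Int) (l : List Int) (m : PySem.Set Int)
    (hm : m.Nodup) : (l.foldl (pvStep cs n) m).Nodup := by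
  induction l generalizing m with
  | nil => exact hm
  | cons a t ih => exact ih _ (pv_nodup_step cs n m a hm)

theorem pv_added_iff (cs : List Char) (x : Int) :
    (∃ i ∈ PySem.List.pyRange 0 (cs.length : Int) 1, pvAddedBy cs (cs.length : Int) i x) ↔
      (x ∈ PySem.List.pyRange 0 (cs.length : Int) 1 ∧ pvPred cs x = true) := by
  simp only [PySem.List.mem_pyRange_one, pvAddedBy, pvPred, Bool.and_eq_true, Bool.or_eq_true,
    Bool.not_eq_eq_eq_not, Bool.not_true, decide_eq_true_eq]
  constructor
  · rintro ⟨i, ⟨hi0, hin⟩, hv, (⟨rfl, hpos, hnv⟩ | ⟨rfl, hlt, hnv⟩)⟩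
    · refine ⟨⟨by omega, by omega⟩, ?_, ?_⟩
      · simp [hnv]
      · exact Or.inr ⟨by omega, by simpa using hv⟩
    · refine ⟨⟨by omega, by omega⟩, ?_, ?_⟩
      · simp [hnv]
      · exact Or.inl ⟨by omega, by simpa using hv⟩
  · rintro ⟨⟨hx0, hxn⟩, hnv, (⟨hpos, hv⟩ | ⟨hlt, hv⟩)⟩
    · exact ⟨x - 1, ⟨by omega, by omega⟩, hv,
        Or.inr ⟨by ring, by omega, by simpa using hnv⟩⟩
    · exact ⟨x + 1, ⟨by omega, by omega⟩, hv,
        Or.inl ⟨by ring, by omega, by simpa using hnv⟩⟩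

theorem pvB_eq_countP (s : String) :
    count_vowel_neighbors_alt s =
      ((PySem.List.pyRange 0 (s.toList.length : Int) 1).countP (pvPred s.toList) : Int) := by
  have hB : count_vowel_neighbors_alt s =
      PySem.Set.len ((PySem.List.pyRange 0 ((s.toList.length : Int)) 1).foldl
        (pvStep s.toList (s.toList.length : Int)) PySem.Set.empty) := rfl
  rw [hB]
  generalize s.toList = cs
  set l := PySem.List.pyRange 0 (cs.length : Int) 1 with hl
  have hnodup : ((l.foldl (pvStep cs (cs.length : Int)) PySem.Set.empty)).Nodup :=
    pv_nodup_fold _ _ _ _ List.nodup_nil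
  have hperm : (l.foldl (pvStep cs (cs.length : Int)) PySem.Set.empty).Perm
      (l.filter (pvPred cs)) := by
    rw [List.perm_ext_iff_of_nodup hnodup (List.Nodup.filter _ (PySem.List.nodup_pyRange_one 0 _))]
    intro x
    rw [pv_mem_fold, List.mem_filter]
    simp only [PySem.Set.empty, List.not_mem_nil, false_or]
    exact pv_added_iff cs x
  unfold PySem.Set.len
  rw [hperm.length_eq, List.countP_eq_length_filter]

-- ===== VERDICT (by name: the statement is the Claim_ definition above) =====
theorem count_vowel_neighbors_spec : Claim_equal_count_vowel_neighbors := by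
  intro s _
  unfold Spec_count_vowel_neighbors
  rw [pvA_eq_countP, pvB_eq_countP]
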